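-- pv_equiv track=rewrite | github.com/Pavithrav2005/Password_Strength_Analyser | src/feature_extraction.py | _contains_dictionary_word
-- ===== SOURCE A (Python) =====
-- def _contains_dictionary_word(password):
--     """Check if password contains common dictionary words"""
--     common_words = [
--         'password', 'admin', 'user', 'login', 'welcome',
--         'hello', 'world', 'test', 'qwerty', 'abc',
--         'love', 'god', 'sex', 'secret', 'money'
--     ]
--
--     password_lower = password.lower()
--     for word in common_words:
--         if word in password_lower:
--             return True
--     return False
-- ===== SOURCE B (Python) =====
-- def _contains_dictionary_word(password):
--     """Check if password contains common dictionary words (position-major scan)."""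
--     common_words = [
--         'password', 'admin', 'user', 'login', 'welcome',
--         'hello', 'world', 'test', 'qwerty', 'abc',
--         'love', 'god', 'sex', 'secret', 'money'
--     ]
--     pl = password.lower()
--     return any(pl.startswith(w, i) for i in range(len(pl)) for w in common_words)
-- ===== Notes on version B (the rewrite author's own statement) =====
-- stated objective: alternative
-- what changed: Replaces the word-major loop of full substring membership tests by a single position-major scan of the lowered password: at each index it tests via startswith whether any common word begins there.
import Mathlib
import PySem

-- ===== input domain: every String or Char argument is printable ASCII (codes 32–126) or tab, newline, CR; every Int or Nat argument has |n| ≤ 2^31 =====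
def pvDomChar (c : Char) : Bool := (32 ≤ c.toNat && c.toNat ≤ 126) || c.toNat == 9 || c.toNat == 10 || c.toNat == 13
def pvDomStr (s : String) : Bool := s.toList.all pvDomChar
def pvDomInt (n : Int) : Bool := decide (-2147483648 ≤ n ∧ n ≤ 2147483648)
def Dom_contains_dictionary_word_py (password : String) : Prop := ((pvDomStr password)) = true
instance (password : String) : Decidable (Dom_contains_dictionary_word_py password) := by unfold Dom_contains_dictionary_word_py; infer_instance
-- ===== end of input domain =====

-- B replaces A's word-major loop of substring searches by a position-major scan of the
-- lowered password testing at each index whether any common word starts there (alternative,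
-- same cost).

-- ===== PORT A =====
-- the common_words list of A, in order
def pvWordsA : List String :=
  ["password", "admin", "user", "login", "welcome",
   "hello", "world", "test", "qwerty", "abc",
   "love", "god", "sex", "secret", "money"]

-- A's loop: return True at the first word contained in password.lower(), else False
def pvLoopA (pl : String) : List String → Bool
  | [] => false
  | w :: ws => if PySem.Str.isIn w pl then true else pvLoopA pl ws

def contains_dictionary_word_py (password : String) : Bool :=
  pvLoopA (PySem.Str.lower password) pvWordsA

-- ===== PORT B =====
-- the same word list, as char lists
def pvWordsB : List (List Char) :=
  ["password".toList, "admin".toList, "user".toList, "login".toList, "welcome".toList,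
   "hello".toList, "world".toList, "test".toList, "qwerty".toList, "abc".toList,
   "love".toList, "god".toList, "sex".toList, "secret".toList, "money".toList]

-- any(pl.startswith(w, i) ...): pl.startswith(w, i) for 0 ≤ i is startswith on (pl.drop i)
def contains_dictionary_word_py_alt (password : String) : Bool :=
  let pl := PySem.Chars.lower password.toList
  (List.range pl.length).any (fun i =>
    pvWordsB.any (fun w => PySem.Chars.startswith (pl.drop i) w))

-- ===== PRECONDITION & SPEC =====
def Spec_contains_dictionary_word_py (password : String) (out : Bool) : Prop := out = contains_dictionary_word_py_alt password
instance (password : String) (out : Bool) : Decidable (Spec_contains_dictionary_word_py password out) := by unfold Spec_contains_dictionary_word_py; infer_instance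

-- ===== CLAIM (what is proved, stated in full; the proofs are below) =====
def Claim_equal_contains_dictionary_word_py : Prop := ∀ (password : String), Dom_contains_dictionary_word_py password → Spec_contains_dictionary_word_py password (contains_dictionary_word_py password)

-- ===== LEMMAS AND PROOFS =====

-- A's early-return loop is List.any of the substring test
theorem pvLoopA_eq_any (pl : String) (ws : List String) :
    pvLoopA pl ws = ws.any (fun w => PySem.Str.isIn w pl) := by
  induction ws with
  | nil => rfl
  | cons w ws ih => simp [pvLoopA, ih]

-- the two word lists line up
theorem pvWordsB_eq_map : pvWordsB = pvWordsA.map String.toList := rfl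

-- every common word is nonempty
theorem pvWordsB_ne_nil : ∀ w ∈ pvWordsB, w ≠ [] := by
  intro w hw
  simp only [pvWordsB, List.mem_cons, List.not_mem_nil, or_false] at hw
  rcases hw with h|h|h|h|h|h|h|h|h|h|h|h|h|h|h <;> subst h <;> simp

-- position-major scan over L equals word-major substring search, for nonempty words
theorem pvScan_eq (L : List Char) (ws : List (List Char)) (hw : ∀ w ∈ ws, w ≠ []) :
    (List.range L.length).any (fun i =>
      ws.any (fun w => PySem.Chars.startswith (L.drop i) w)) =
    ws.any (fun w => PySem.Chars.isIn w L) := by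
  apply Bool.eq_iff_iff.mpr
  simp only [List.any_eq_true, List.mem_range, PySem.Chars.startswith_iff]
  constructor
  · rintro ⟨i, _, w, hwmem, hpre⟩
    exact ⟨w, hwmem, (PySem.Chars.exists_prefix_drop_iff_isIn w L).mp ⟨i, hpre⟩⟩
  · rintro ⟨w, hwmem, hin⟩
    obtain ⟨j, hpre⟩ := (PySem.Chars.exists_prefix_drop_iff_isIn w L).mpr hin
    refine ⟨j, ?_, w, hwmem, hpre⟩
    by_contra hj
    have : L.drop j = [] := List.drop_eq_nil_of_le (by omega)
    rw [this] at hpre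
    exact hw w hwmem (List.prefix_nil.mp hpre)

-- ===== VERDICT (by name: the statement is the Claim_ definition above) =====
theorem contains_dictionary_word_py_spec : Claim_equal_contains_dictionary_word_py := by
  intro password _
  unfold Spec_contains_dictionary_word_py contains_dictionary_word_py contains_dictionary_word_py_alt
  rw [pvLoopA_eq_any, pvScan_eq _ _ pvWordsB_ne_nil, pvWordsB_eq_map, List.any_map]
  simp [PySem.Str.isIn, PySem.Str.lower, Function.comp_def]
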